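-- pv_equiv track=rewrite | github.com/ONSdigital/sbr-ui | sbr_ui/utilities/helpers.py | format_children
-- ===== SOURCE A (Python) =====
-- def format_children(children: dict):
--     """ TODO: do this immutably """
--     vats = []
--     chs = []
--     payes = []
--     leus = []
--     lus = []
--
--     # Rather than a dict of unitId:unitType, we want a dict of unitType:[unitId's], to make parsing them in the
--     # template easier
--     for child_id, child_type in children.items():
--         if child_type == "VAT":
--             vats.append(child_id)
--         elif child_type == "CH":
--             chs.append(child_id)
--         elif child_type == "PAYE":
--             payes.append(child_id)
--         elif child_type == "LEU":
--             leus.append(child_id)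
--         elif child_type == "LU":
--             lus.append(child_id)
--
--     children = {"VAT": vats, "CH": chs, "PAYE": payes, "LEU": leus, "LU": lus}
--
--     # Filter empty arrays
--     return {k: v for k, v in children.items() if len(v) != 0}
-- ===== SOURCE B (Python) =====
-- def format_children(children: dict):
--     return {t: ids
--             for t in ("VAT", "CH", "PAYE", "LEU", "LU")
--             if (ids := [cid for cid, ct in children.items() if ct == t])}
-- ===== Notes on version B (the rewrite author's own statement) =====
-- stated objective: simpler
-- what changed: Replaces the five-accumulator branching pass plus rebuild-and-filter with one comprehension that, for each known type in the fixed order, scans the items once collecting matching ids and keeps only non-empty buckets.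
import Mathlib
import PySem

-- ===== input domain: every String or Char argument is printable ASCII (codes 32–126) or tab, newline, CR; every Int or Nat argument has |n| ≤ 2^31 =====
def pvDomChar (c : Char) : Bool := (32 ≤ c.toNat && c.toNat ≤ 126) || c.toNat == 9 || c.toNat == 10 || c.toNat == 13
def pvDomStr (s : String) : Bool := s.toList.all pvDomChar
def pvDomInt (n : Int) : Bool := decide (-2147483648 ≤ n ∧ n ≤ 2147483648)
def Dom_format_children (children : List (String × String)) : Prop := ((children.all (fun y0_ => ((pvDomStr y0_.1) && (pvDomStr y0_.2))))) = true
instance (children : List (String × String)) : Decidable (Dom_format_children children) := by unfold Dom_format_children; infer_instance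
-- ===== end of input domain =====

-- B replaces A's single branching pass with five accumulators by one scan per known
-- type in the fixed order, keeping non-empty buckets (objective: simpler).

-- ===== PORT A =====
-- the for-loop over children.items(), appending each id to its type's accumulator
def fcLoop (children : List (String × String))
    (acc : List String × List String × List String × List String × List String) :
    List String × List String × List String × List String × List String :=
  match children with
  | [] => acc
  | (cid, ct) :: rest =>
    let (vats, chs, payes, leus, lus) := acc
    fcLoop rest
      (if ct == "VAT" then (vats ++ [cid], chs, payes, leus, lus)
       else if ct == "CH" then (vats, chs ++ [cid], payes, leus, lus)
       else if ct == "PAYE" then (vats, chs, payes ++ [cid], leus, lus)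
       else if ct == "LEU" then (vats, chs, payes, leus ++ [cid], lus)
       else if ct == "LU" then (vats, chs, payes, leus, lus ++ [cid])
       else (vats, chs, payes, leus, lus))

def format_children (children : List (String × String)) : List (String × List String) :=
  let s := fcLoop children ([], [], [], [], [])
  let d : List (String × List String) :=
    [("VAT", s.1), ("CH", s.2.1), ("PAYE", s.2.2.1), ("LEU", s.2.2.2.1), ("LU", s.2.2.2.2)]
  d.filter (fun kv => kv.2.length != 0)

-- ===== PORT B =====
def format_children_alt (children : List (String × String)) : List (String × List String) :=
  (["VAT", "CH", "PAYE", "LEU", "LU"].map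
      (fun t => (t, (children.filter (fun p => p.2 == t)).map Prod.fst))).filter
    (fun kv => !kv.2.isEmpty)

-- ===== PRECONDITION & SPEC =====
def Spec_format_children (children : List (String × String)) (out : List (String × List String)) : Prop := out = format_children_alt children
instance (children : List (String × String)) (out : List (String × List String)) : Decidable (Spec_format_children children out) := by unfold Spec_format_children; infer_instance

-- ===== CLAIM (what is proved, stated in full; the proofs are below) =====
def Claim_equal_format_children : Prop := ∀ (children : List (String × String)), Dom_format_children children → Spec_format_children children (format_children children)

-- ===== LEMMAS AND PROOFS =====

def fcBucket (t : String) (children : List (String × String)) : List String :=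
  (children.filter (fun p => p.2 == t)).map Prod.fst

theorem fcLoop_eq (children : List (String × String)) (acc : List String × List String × List String × List String × List String) :
    fcLoop children acc =
      (acc.1 ++ fcBucket "VAT" children,
       acc.2.1 ++ fcBucket "CH" children,
       acc.2.2.1 ++ fcBucket "PAYE" children,
       acc.2.2.2.1 ++ fcBucket "LEU" children,
       acc.2.2.2.2 ++ fcBucket "LU" children) := by
  induction children generalizing acc with
  | nil => simp [fcLoop, fcBucket]
  | cons hd tl ih =>
    obtain ⟨cid, ct⟩ := hd
    obtain ⟨vats, chs, payes, leus, lus⟩ := acc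
    by_cases h1 : ct = "VAT" <;> by_cases h2 : ct = "CH" <;> by_cases h3 : ct = "PAYE" <;>
      by_cases h4 : ct = "LEU" <;> by_cases h5 : ct = "LU" <;>
      simp_all [fcLoop, fcBucket]

theorem fcLen (l : List String) : (l.length != 0) = !l.isEmpty := by
  cases l <;> rfl

-- ===== VERDICT (by name: the statement is the Claim_ definition above) =====
theorem format_children_spec : Claim_equal_format_children := by
  intro children _
  unfold Spec_format_children format_children format_children_alt
  simp only [fcLoop_eq, List.nil_append, List.map]
  simp [fcLen, fcBucket]
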